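-- pv_equiv track=rewrite | github.com/AgibotGeneral/MANSION | pipeline/nodes/portable_convert.py | _build_open_pairs
-- ===== SOURCE A (Python) =====
-- from typing import Any, Dict, List, Tuple, Optional, Set
--
-- def _build_open_pairs(names: List[str], policy: str) -> List[Tuple[str, str]]:
--     if policy != 'auto':
--         return []
--     # Simple whitelist rules by name tokens
--     s = set(n.lower() for n in names)
--     pairs: List[Tuple[str, str]] = []
--     def _has(k: str) -> Optional[str]:
--         for n in names:
--             if k in n.lower():
--                 return n
--         return None
--     living = _has('living')
--     kitchen = _has('kitchen')
--     dining = _has('dining')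
--     if living and kitchen:
--         pairs.append((living, kitchen))
--     if living and dining:
--         pairs.append((living, dining))
--     if kitchen and dining:
--         pairs.append((kitchen, dining))
--     return pairs
-- ===== SOURCE B (Python) =====
-- from typing import List, Tuple
--
-- TOKENS = ('living', 'kitchen', 'dining')
--
-- def _build_open_pairs(names: List[str], policy: str) -> List[Tuple[str, str]]:
--     if policy != 'auto':
--         return []
--     # Single indexing pass: first name (in list order) whose lowercase contains each token.
--     first = {}
--     for n in names:
--         low = n.lower()
--         for t in TOKENS:
--             if t not in first and t in low:
--                 first[t] = n
--     # Assemble the ordered token pairs (i < j) present in the index.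
--     pairs: List[Tuple[str, str]] = []
--     for i in range(len(TOKENS)):
--         for j in range(i + 1, len(TOKENS)):
--             if TOKENS[i] in first and TOKENS[j] in first:
--                 pairs.append((first[TOKENS[i]], first[TOKENS[j]]))
--     return pairs
-- ===== Notes on version B (the rewrite author's own statement) =====
-- stated objective: alternative
-- what changed: Replaces the three separate whole-list scans of A's _has helper (and the unused set s) with one indexing pass over names that fills a token->first-matching-name dict, and replaces the three hard-coded ifs with a nested index loop over ordered token pairs.
import Mathlib
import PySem

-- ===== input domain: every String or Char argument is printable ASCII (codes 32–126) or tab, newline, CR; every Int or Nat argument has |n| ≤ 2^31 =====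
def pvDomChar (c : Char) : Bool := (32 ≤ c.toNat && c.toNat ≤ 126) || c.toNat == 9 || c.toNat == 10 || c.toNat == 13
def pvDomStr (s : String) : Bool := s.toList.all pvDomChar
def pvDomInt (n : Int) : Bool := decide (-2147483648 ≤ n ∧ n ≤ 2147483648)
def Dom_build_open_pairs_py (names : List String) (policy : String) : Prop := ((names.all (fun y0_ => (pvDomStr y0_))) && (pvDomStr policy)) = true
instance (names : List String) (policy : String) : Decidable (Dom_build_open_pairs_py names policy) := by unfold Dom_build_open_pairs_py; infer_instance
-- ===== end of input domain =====

-- B replaces A's three whole-list scans (helper _has per token, plus an unused set) with one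
-- dict-indexing pass over names and a nested index loop over ordered token pairs. Objective: alternative.


-- Python truthiness of Optional[str]: None and "" are falsy.
def pyTruthyStr (o : Option String) : Bool :=
  match o with
  | none => false
  | some s => s ≠ ""

-- ===== PORT A =====
-- the `for n in names: if k in n.lower(): return n / return None` helper
def pyHas (names : List String) (k : String) : Option String :=
  names.find? (fun n => PySem.Str.isIn k (PySem.Str.lower n))

def build_open_pairs_py (names : List String) (policy : String) : List (String × String) :=
  if policy ≠ "auto" then []
  else
    let _s := PySem.Set.ofList (names.map PySem.Str.lower)  -- A builds this set and never uses it
    let living := pyHas names "living"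
    let kitchen := pyHas names "kitchen"
    let dining := pyHas names "dining"
    let pairs : List (String × String) := []
    let pairs := if pyTruthyStr living && pyTruthyStr kitchen then
        pairs ++ [(living.getD "", kitchen.getD "")] else pairs
    let pairs := if pyTruthyStr living && pyTruthyStr dining then
        pairs ++ [(living.getD "", dining.getD "")] else pairs
    let pairs := if pyTruthyStr kitchen && pyTruthyStr dining then
        pairs ++ [(kitchen.getD "", dining.getD "")] else pairs
    pairs

-- ===== PORT B =====
def pvTokens : List String := ["living", "kitchen", "dining"]

-- one step of B's indexing pass: for each token not yet in the dict, record n if n.lower() contains it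
def bFill (first : PySem.Dict String String) (n : String) : PySem.Dict String String :=
  let low := PySem.Str.lower n
  pvTokens.foldl (fun d t => if !(d.contains t) && PySem.Str.isIn t low then d.insert t n else d) first

def build_open_pairs_py_alt (names : List String) (policy : String) : List (String × String) :=
  if policy ≠ "auto" then []
  else
    let first := names.foldl bFill PySem.Dict.empty
    (PySem.List.pyRange 0 (pvTokens.length : Int) 1).foldl (fun pairs i =>
      (PySem.List.pyRange (i + 1) (pvTokens.length : Int) 1).foldl (fun pairs j =>
        let a := ((PySem.List.pyGet? pvTokens i).getD "")
        let b := ((PySem.List.pyGet? pvTokens j).getD "")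
        if first.contains a && first.contains b then
          pairs ++ [(first.getD a "", first.getD b "")]
        else pairs) pairs) []

-- ===== PRECONDITION & SPEC =====
def Spec_build_open_pairs_py (names : List String) (policy : String) (out : List (String × String)) : Prop := out = build_open_pairs_py_alt names policy
instance (names : List String) (policy : String) (out : List (String × String)) : Decidable (Spec_build_open_pairs_py names policy out) := by unfold Spec_build_open_pairs_py; infer_instance

-- ===== CLAIM (what is proved, stated in full; the proofs are below) =====
def Claim_equal_build_open_pairs_py : Prop := ∀ (names : List String) (policy : String), Dom_build_open_pairs_py names policy → Spec_build_open_pairs_py names policy (build_open_pairs_py names policy)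

-- ===== LEMMAS AND PROOFS =====

-- effect of one bFill step on one of the three token keys
lemma bFill_get? (d : PySem.Dict String String) (n t : String) (ht : t ∈ pvTokens) :
    (bFill d n).get? t =
      if (d.get? t).isNone ∧ PySem.Str.isIn t (PySem.Str.lower n) then some n else d.get? t := by
  fin_cases ht <;>
    simp only [bFill, pvTokens, List.foldl] <;>
    split_ifs with h1 h2 h3 h4 h5 h6 h7 <;>
    simp_all [PySem.Dict.get?_insert, PySem.Dict.contains_eq_isSome_get?,
      Option.isNone_iff_eq_none]

-- the indexing pass amounts to first-match search per token
lemma fold_bFill_get? (names : List String) (d : PySem.Dict String String) (t : String)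
    (ht : t ∈ pvTokens) :
    (names.foldl bFill d).get? t =
      ((d.get? t).or (names.find? (fun n => PySem.Str.isIn t (PySem.Str.lower n)))) := by
  induction names generalizing d with
  | nil => simp
  | cons h tl ih =>
    rw [List.foldl_cons, ih (bFill d h), bFill_get? d h t ht]
    by_cases h1 : (d.get? t).isNone <;> by_cases h2 : PySem.Str.isIn t (PySem.Str.lower h) <;>
      cases hd : d.get? t <;> simp_all [List.find?]

-- a name matched by a token search is nonempty, so Python truthiness is isSome
lemma pyTruthyStr_pyHas (names : List String) (t : String) (ht : t ∈ pvTokens) :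
    pyTruthyStr (pyHas names t) = (pyHas names t).isSome := by
  cases hf : pyHas names t with
  | none => simp [pyTruthyStr]
  | some n =>
    have hp := List.find?_some hf
    have hne : n ≠ "" := by
      intro h
      subst h
      fin_cases ht <;> simp_all [PySem.Str.lower, PySem.Str.isIn] <;> revert hp <;> decide
    simp [pyTruthyStr, hne]

-- ===== VERDICT (by name: the statement is the Claim_ definition above) =====
theorem build_open_pairs_py_spec : Claim_equal_build_open_pairs_py := by
  intro names policy _
  unfold Spec_build_open_pairs_py build_open_pairs_py build_open_pairs_py_alt
  by_cases hp : policy = "auto"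
  · have hL := fold_bFill_get? names PySem.Dict.empty "living" (by decide)
    have hK := fold_bFill_get? names PySem.Dict.empty "kitchen" (by decide)
    have hD := fold_bFill_get? names PySem.Dict.empty "dining" (by decide)
    simp only [PySem.Dict.get?_empty, Option.none_or] at hL hK hD
    have tL := pyTruthyStr_pyHas names "living" (by decide)
    have tK := pyTruthyStr_pyHas names "kitchen" (by decide)
    have tD := pyTruthyStr_pyHas names "dining" (by decide)
    have hr0 : PySem.List.pyRange 0 ((pvTokens.length : Nat) : Int) 1 = [0, 1, 2] := by decide
    have hr1 : PySem.List.pyRange (0 + 1) ((pvTokens.length : Nat) : Int) 1 = [1, 2] := by decide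
    have hr2 : PySem.List.pyRange (1 + 1) ((pvTokens.length : Nat) : Int) 1 = [2] := by decide
    have hr3 : PySem.List.pyRange (2 + 1) ((pvTokens.length : Nat) : Int) 1 = [] := by decide
    have e0 : (PySem.List.pyGet? pvTokens 0).getD "" = "living" := by decide
    have e1 : (PySem.List.pyGet? pvTokens 1).getD "" = "kitchen" := by decide
    have e2 : (PySem.List.pyGet? pvTokens 2).getD "" = "dining" := by decide
    simp only [pyHas] at tL tK tD
    simp only [hp, hr0, hr1, hr2, hr3, List.foldl_cons, List.foldl_nil,
      PySem.Dict.getD_eq_get?_getD, PySem.Dict.contains_eq_isSome_get?, hL, hK, hD,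
      e0, e1, e2, pyHas, tL, tK, tD, ne_eq, not_true_eq_false, if_false]
  · simp [hp]
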